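-- pv_equiv track=rewrite | github.com/SeonggonKim/Programmers | 프로그래머스/lv0/120921. 문자열 밀기/문자열 밀기.py | solution
-- ===== SOURCE A (Python) =====
-- def solution(A, B):
--     answer = 0
--     A_list = list(A)
--     while True:
--         if A == B:
--             break
--         elif answer > len(A_list):
--             answer = -1
--             break
--         else:
--             A_list.insert(0, A_list.pop())
--             A = "".join(A_list)
--             answer += 1
--     return answer
-- ===== SOURCE B (Python) =====
-- def solution(A, B):
--     if A == B:
--         return 0
--     if len(A) != len(B):
--         return -1
--     i = (A + A).rfind(B, 1)
--     return -1 if i == -1 else len(A) - i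
-- ===== Notes on version B (the rewrite author's own statement) =====
-- stated objective: faster
-- what changed: Replaces the simulate-every-rotation loop (rebuild the rotated string and compare, up to len(A)+1 times) by the doubled-string trick: B occurs in A+A at index i iff a rotation matches, so one (A+A).rfind(B, 1) call gives the right-rotation count as len(A)-i.
import Mathlib
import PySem

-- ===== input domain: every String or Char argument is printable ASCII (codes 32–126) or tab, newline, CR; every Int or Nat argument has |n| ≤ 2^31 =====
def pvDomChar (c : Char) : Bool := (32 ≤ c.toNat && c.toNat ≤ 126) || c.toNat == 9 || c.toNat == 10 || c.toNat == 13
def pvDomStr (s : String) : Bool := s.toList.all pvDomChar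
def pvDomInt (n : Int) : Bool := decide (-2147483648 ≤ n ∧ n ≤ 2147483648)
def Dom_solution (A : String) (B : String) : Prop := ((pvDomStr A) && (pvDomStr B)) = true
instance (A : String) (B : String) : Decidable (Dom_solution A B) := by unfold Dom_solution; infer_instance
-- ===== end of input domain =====

-- B replaces A's rotate-and-compare simulation loop by the doubled-string trick:
-- B occurs in A+A at index i (found with str.rfind) iff some rotation matches, and the
-- right-rotation count is len(A) - i; objective: faster (one substring search instead of
-- up to len(A)+1 rotations, each rebuilt and compared).

-- ===== PORT A =====
-- the while-True loop, one fuel constructor per iteration; fuel len(A)+2 is enough because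
-- `answer` grows by 1 each pass and the loop stops once answer > len(A_list) (proved below).
-- Python compares the re-joined string `A` with `B`; the port carries the char list
-- (list(A) / "".join are identities on the char-list side).
def solLoopA (Bl : List Char) : Nat → Int → List Char → Int
  | 0, answer, _ => answer
  | fuel + 1, answer, al =>
    if al = Bl then answer
    else if answer > (al.length : Int) then -1
    else
      match PySem.List.pop? al (-1) with
      | none => -1   -- Python raises IndexError (pop from empty list); excluded by Pre_
      | some (c, rest) => solLoopA Bl fuel (answer + 1) (c :: rest)

def solution (A : String) (B : String) : Int :=
  solLoopA B.toList (A.toList.length + 2) 0 A.toList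

-- ===== PORT B =====
def solution_alt (A : String) (B : String) : Int :=
  if A = B then 0
  else if PySem.Str.len A ≠ PySem.Str.len B then -1
  else
    let i := PySem.Str.rfindFrom (A ++ A) B 1
    if i = -1 then -1 else PySem.Str.len A - i

-- ===== PRECONDITION & SPEC =====
-- A raises IndexError (pop from an empty list) exactly when A = "" and B ≠ ""; nothing else is excluded.
def Pre_solution (A : String) (B : String) : Prop := A = B ∨ A ≠ ""
instance (A : String) (B : String) : Decidable (Pre_solution A B) := by unfold Pre_solution; infer_instance
def pvWitness_solution : String × String := ("ab", "ba")

def Spec_solution (A : String) (B : String) (out : Int) : Prop := out = solution_alt A B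
instance (A : String) (B : String) (out : Int) : Decidable (Spec_solution A B out) := by unfold Spec_solution; infer_instance

-- ===== CLAIM (what is proved, stated in full; the proofs are below) =====
def Claim_equal_solution : Prop := ∀ (A : String) (B : String), Dom_solution A B → Pre_solution A B → Spec_solution A B (solution A B)

-- ===== LEMMAS AND PROOFS =====

-- seg Al i = the left rotation of Al by i = the length-n window of Al++Al at index i
def seg (Al : List Char) (i : Nat) : List Char := Al.drop i ++ Al.take i

theorem seg_zero (Al : List Char) : seg Al 0 = Al := by simp [seg]

theorem seg_full (Al : List Char) : seg Al Al.length = Al := by simp [seg]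

theorem seg_length (Al : List Char) (i : Nat) : (seg Al i).length = Al.length := by
  simp [seg]; omega

-- popping the last element and consing it in front turns seg i into seg (i-1)
theorem rot_seg (Al : List Char) (i : Nat) (h1 : 1 ≤ i) (h2 : i ≤ Al.length) :
    ∃ c rest, PySem.List.pop? (seg Al i) (-1) = some (c, rest) ∧ c :: rest = seg Al (i - 1) := by
  have hlt : i - 1 < Al.length := by omega
  refine ⟨Al[i-1], Al.drop i ++ Al.take (i-1), ?_, ?_⟩
  · have htake : Al.take i = Al.take (i-1) ++ [Al[i-1]] := by
      conv_lhs => rw [show i = (i-1) + 1 by omega, List.take_add_one]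
      simp [List.getElem?_eq_getElem hlt]
    rw [seg, htake, ← List.append_assoc]
    exact PySem.List.pop?_last _ _
  · have hdrop : Al.drop (i-1) = Al[i-1] :: Al.drop i := by
      rw [List.drop_eq_getElem_cons hlt, show i - 1 + 1 = i by omega]
    rw [seg, hdrop]; simp

-- Bl is a prefix of (Al++Al).drop p (p ≤ |Al|, |Bl| = |Al|) iff Bl is exactly the window seg Al p
theorem pref_iff (Al Bl : List Char) (p : Nat) (hlen : Bl.length = Al.length)
    (hp : p ≤ Al.length) : Bl <+: (Al ++ Al).drop p ↔ Bl = seg Al p := by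
  rw [List.drop_append_of_le_length hp, List.prefix_iff_eq_take, hlen, List.take_append,
    List.take_of_length_le (by simp)]
  have h2 : Al.length - (Al.drop p).length = p := by simp; omega
  rw [h2, seg]

theorem pref_false_big (Al Bl : List Char) (p : Nat) (hlen : Bl.length = Al.length)
    (hn : 0 < Al.length) (hp : Al.length < p) : ¬ Bl <+: (Al ++ Al).drop p := by
  intro h
  have := h.length_le
  simp at this
  omega

-- rfind.go scans indices downward; failing tests can be skipped
theorem go_skip (g sub : List Char) (a b : Nat) (hba : b ≤ a)
    (h : ∀ j, b < j → j ≤ a → ¬ sub <+: g.drop j) :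
    PySem.Chars.rfind.go g sub a = PySem.Chars.rfind.go g sub b := by
  induction a with
  | zero => have hb : b = 0 := by omega
            rw [hb]
  | succ a ih =>
    rcases Nat.eq_or_lt_of_le hba with rfl | hlt
    · rfl
    · rw [PySem.Chars.rfind.go]
      have hfail : sub.isPrefixOf (g.drop (a+1)) = false := by
        rw [← Bool.not_eq_true, List.isPrefixOf_iff_prefix]
        exact h (a+1) (by omega) le_rfl
      rw [hfail]
      simp only [Bool.false_eq_true, if_false]
      exact ih (by omega) (fun j h1 h2 => h j h1 (by omega))

theorem go_ge (g sub : List Char) (j : Nat) : -1 ≤ PySem.Chars.rfind.go g sub j := by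
  induction j with
  | zero => rw [PySem.Chars.rfind.go]; split <;> simp
  | succ j ih => rw [PySem.Chars.rfind.go]; split; · omega
                 · exact ih

-- the lockstep lemma: A's loop at rotation count n-(j+1) (current list seg (j+1)) computes
-- the same answer as rfind.go scanning downward from index j of (Al++Al).drop 1
theorem lockstep (Al Bl : List Char) (hlen : Bl.length = Al.length) (hAB : Al ≠ Bl)
    (hn2 : 2 ≤ Al.length) :
    ∀ j, j + 1 < Al.length →
    (∀ p, j + 1 < p → p < Al.length → Bl ≠ seg Al p) →
    ∀ fuel, j + 3 ≤ fuel →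
    solLoopA Bl fuel ((Al.length - (j + 1) : Nat) : Int) (seg Al (j + 1)) =
      (if PySem.Chars.rfind.go ((Al ++ Al).drop 1) Bl j = -1 then -1
       else (Al.length : Int) - (1 + PySem.Chars.rfind.go ((Al ++ Al).drop 1) Bl j)) := by
  intro j
  induction j with
  | zero =>
    intro hj hprev fuel hfuel
    obtain ⟨f, rfl⟩ : ∃ f, fuel = f + 1 := ⟨fuel - 1, by omega⟩
    rw [show (0:Nat) + 1 = 1 from rfl, solLoopA, PySem.Chars.rfind.go]
    by_cases hseg : Bl = seg Al 1
    · have hpt : Bl.isPrefixOf ((Al ++ Al).drop 1) = true := by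
        rw [List.isPrefixOf_iff_prefix, pref_iff Al Bl 1 hlen (by omega)]; exact hseg
      rw [if_pos hseg.symm, hpt, if_pos rfl]
      norm_num; omega
    · have hpf : Bl.isPrefixOf ((Al ++ Al).drop 1) = false := by
        rw [← Bool.not_eq_true, List.isPrefixOf_iff_prefix, pref_iff Al Bl 1 hlen (by omega)]
        exact hseg
      have h1 : ¬ (seg Al 1 = Bl) := fun h => hseg h.symm
      have h2 : ¬ (((Al.length - 1 : Nat) : Int) > ((seg Al 1).length : Int)) := by
        rw [seg_length]; omega
      obtain ⟨c, rest, hpop, hcr⟩ := rot_seg Al 1 le_rfl (by omega)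
      rw [hpf, if_neg h1, if_neg h2, hpop]
      simp only [Bool.false_eq_true, if_false]
      rw [show (1:Nat) - 1 = 0 from rfl, seg_zero] at hcr
      rw [hcr]
      obtain ⟨f', rfl⟩ : ∃ f', f = f' + 1 := ⟨f - 1, by omega⟩
      rw [solLoopA, if_neg hAB, if_neg (show ¬ (((Al.length - 1 : Nat) : Int) + 1 > (Al.length : Int)) by omega)]
      obtain ⟨c2, rest2, hpop2, hcr2⟩ := rot_seg Al Al.length (by omega) le_rfl
      rw [seg_full] at hpop2
      simp only [hpop2]
      rw [hcr2]
      obtain ⟨f'', rfl⟩ : ∃ f'', f' = f'' + 1 := ⟨f' - 1, by omega⟩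
      have hlast : ¬ (seg Al (Al.length - 1) = Bl) := by
        rcases Nat.lt_or_ge 1 (Al.length - 1) with h | h
        · exact fun hh => hprev (Al.length - 1) (by omega) (by omega) hh.symm
        · rw [show Al.length - 1 = 1 by omega]; exact h1
      rw [solLoopA, if_neg hlast,
        if_pos (show ((Al.length - 1 : Nat) : Int) + 1 + 1 > ((seg Al (Al.length - 1)).length : Int) by rw [seg_length]; omega)]
      norm_num
  | succ j ih =>
    intro hj hprev fuel hfuel
    obtain ⟨f, rfl⟩ : ∃ f, fuel = f + 1 := ⟨fuel - 1, by omega⟩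
    rw [show j + 1 + 1 = j + 2 from rfl, solLoopA, PySem.Chars.rfind.go]
    have hdd : List.drop (j+1) (List.drop 1 (Al ++ Al)) = (Al ++ Al).drop (j+2) := by
      rw [List.drop_drop]; congr 1; omega
    by_cases hseg : Bl = seg Al (j+2)
    · have hpt : Bl.isPrefixOf (List.drop (j+1) (List.drop 1 (Al ++ Al))) = true := by
        rw [List.isPrefixOf_iff_prefix, hdd, pref_iff Al Bl (j+2) hlen (by omega)]
        exact hseg
      rw [if_pos hseg.symm, hpt, if_pos rfl]
      norm_num; omega
    · have hpf : Bl.isPrefixOf (List.drop (j+1) (List.drop 1 (Al ++ Al))) = false := by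
        rw [← Bool.not_eq_true, List.isPrefixOf_iff_prefix, hdd,
          pref_iff Al Bl (j+2) hlen (by omega)]
        exact hseg
      have h1 : ¬ (seg Al (j+2) = Bl) := fun h => hseg h.symm
      have h2 : ¬ (((Al.length - (j+2) : Nat) : Int) > ((seg Al (j+2)).length : Int)) := by
        rw [seg_length]; omega
      obtain ⟨c, rest, hpop, hcr⟩ := rot_seg Al (j+2) (by omega) (by omega)
      rw [show j + 2 - 1 = j + 1 from rfl] at hcr
      rw [hpf, if_neg h1, if_neg h2, hpop]
      simp only [Bool.false_eq_true, if_false]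
      rw [hcr,
        show ((Al.length - (j+2) : Nat) : Int) + 1 = ((Al.length - (j+1) : Nat) : Int) by omega]
      exact ih (by omega) (fun p hp1 hp2 => if hp : p = j + 2 then hp ▸ hseg
        else hprev p (by omega) hp2) f (by omega)

-- the loop returns -1 when the lengths differ (rotation preserves length)
theorem loop_len_ne (Al Bl : List Char) (hn : 0 < Al.length) (hlen : Bl.length ≠ Al.length) :
    ∀ m, m ≤ Al.length + 1 → ∀ fuel, m + 1 ≤ fuel → ∀ al : List Char, al.length = Al.length →
    solLoopA Bl fuel ((Al.length + 1 - m : Nat) : Int) al = -1 := by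
  intro m
  induction m with
  | zero =>
    intro _ fuel hfuel al hal
    obtain ⟨f, rfl⟩ : ∃ f, fuel = f + 1 := ⟨fuel - 1, by omega⟩
    rw [solLoopA]
    have hne : al ≠ Bl := fun h => hlen (by rw [← h, hal])
    rw [if_neg hne, if_pos (by push_cast [hal]; omega)]
  | succ m ih =>
    intro hm fuel hfuel al hal
    obtain ⟨f, rfl⟩ : ∃ f, fuel = f + 1 := ⟨fuel - 1, by omega⟩
    rw [solLoopA]
    have hne : al ≠ Bl := fun h => hlen (by rw [← h, hal])
    rw [if_neg hne, if_neg (by push_cast [hal]; omega)]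
    have halne : al ≠ [] := by intro h; rw [h] at hal; simp at hal; omega
    have hsplit : al.dropLast ++ [al.getLast halne] = al := List.dropLast_append_getLast halne
    rw [← hsplit, PySem.List.pop?_last]
    have hcast : ((Al.length + 1 - (m+1) : Nat) : Int) + 1 = ((Al.length + 1 - m : Nat) : Int) := by omega
    rw [hcast]
    apply ih (by omega) f (by omega)
    have := congrArg List.length hsplit
    simp at this ⊢
    omega

-- B's rfindFrom (A+A) B 1 reduced: start bound 1, end bound = full length
theorem rfindFrom_reduce (Al Bl : List Char) (hn : 1 ≤ Al.length) :
    PySem.Chars.rfindFrom (Al ++ Al) Bl 1 none =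
      (if PySem.Chars.rfind (List.drop 1 (Al ++ Al)) Bl = -1 then -1
       else 1 + PySem.Chars.rfind (List.drop 1 (Al ++ Al)) Bl) := by
  rw [PySem.Chars.rfindFrom]
  simp only [List.length_append]
  rw [if_neg (by push_cast; omega)]
  norm_num
  rw [List.take_of_length_le (by simp)]

theorem main_eq (A B : String) (h : Pre_solution A B) : solution A B = solution_alt A B := by
  by_cases hAB : A = B
  · subst hAB
    rw [solution, solution_alt, if_pos rfl, solLoopA, if_pos rfl]
  · have hABl : A.toList ≠ B.toList := fun hh => hAB (String.ext_iff.mpr hh)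
    have hAne : A ≠ "" := h.resolve_left hAB
    have hAnil : A.toList ≠ [] := fun hh => hAne (String.toList_eq_nil_iff.mp hh)
    have hn : 1 ≤ A.toList.length := by
      cases hA : A.toList with
      | nil => exact absurd hA hAnil
      | cons x xs => simp
    rw [solution, solution_alt, if_neg hAB]
    by_cases hL : B.toList.length = A.toList.length
    · -- equal lengths
      rw [if_neg (by rw [PySem.Str.len_eq, PySem.Str.len_eq]; omega)]
      simp only [PySem.Str.rfindFrom_eq, String.toList_append, PySem.Str.len_eq]
      rw [rfindFrom_reduce A.toList B.toList hn, PySem.Chars.rfind]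
      have hglen : (List.drop 1 (A.toList ++ A.toList)).length = A.toList.length + A.toList.length - 1 := by
        simp
      rw [hglen]
      rcases Nat.lt_or_ge A.toList.length 2 with h1 | h2
      · -- n = 1: no proper rotation exists; both sides give -1
        have hn1 : A.toList.length = 1 := by omega
        obtain ⟨a, ha⟩ := List.length_eq_one_iff.mp hn1
        have hn1' : B.toList.length = 1 := by omega
        obtain ⟨b, hb⟩ := List.length_eq_one_iff.mp hn1'
        have hab : ¬ (b = a) := fun hh => hABl (by rw [ha, hb, hh])
        have hne : ¬ ([a] = [b]) := fun hh => hABl (by rw [ha, hb, hh])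
        rw [ha, hb]
        norm_num
        have hpop1 : PySem.List.pop? [a] (-1) = some (a, ([] : List Char)) := by
          rw [show [a] = ([] : List Char) ++ [a] from rfl]
          exact PySem.List.pop?_last _ _
        have hr : PySem.Chars.rfind.go [a] [b] 1 = -1 := by
          rw [PySem.Chars.rfind.go]
          norm_num [List.isPrefixOf]
          rw [PySem.Chars.rfind.go]
          norm_num [List.isPrefixOf, hab]
        rw [hr]
        norm_num
        rw [solLoopA, if_neg hne, if_neg (by norm_num), hpop1]
        simp only
        rw [solLoopA, if_neg hne, if_neg (by norm_num), hpop1]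
        simp only
        rw [solLoopA, if_neg hne, if_pos (by norm_num)]
      · -- n ≥ 2: skip the always-failing high indices, then run the lockstep lemma
        have hskip : PySem.Chars.rfind.go (List.drop 1 (A.toList ++ A.toList)) B.toList
            (A.toList.length + A.toList.length - 1) =
            PySem.Chars.rfind.go (List.drop 1 (A.toList ++ A.toList)) B.toList (A.toList.length - 2) := by
          apply go_skip _ _ _ _ (by omega)
          intro j hj1 hj2
          rw [List.drop_drop]
          rcases Nat.lt_or_ge A.toList.length (1 + j) with hbig | hsmall
          · exact pref_false_big A.toList B.toList (1 + j) hL hn hbig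
          · have hj : 1 + j = A.toList.length := by omega
            rw [hj, pref_iff A.toList B.toList A.toList.length hL le_rfl, seg_full]
            exact fun hh => hABl hh.symm
        rw [hskip]
        obtain ⟨c, rest, hpop, hcr⟩ := rot_seg A.toList A.toList.length (by omega) le_rfl
        rw [seg_full] at hpop
        rw [solLoopA, if_neg hABl, if_neg (by omega)]
        simp only [hpop]
        rw [hcr]
        have hstep := lockstep A.toList B.toList hL hABl h2 (A.toList.length - 2) (by omega)
          (fun p hp1 hp2 => absurd (by omega : p < p) (lt_irrefl p)) (A.toList.length + 1) (by omega)
        rw [show A.toList.length - 2 + 1 = A.toList.length - 1 by omega] at hstep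
        rw [show (0 : Int) + 1 = ((A.toList.length - (A.toList.length - 1) : Nat) : Int) by omega]
        rw [hstep]
        set r := PySem.Chars.rfind.go (List.drop 1 (A.toList ++ A.toList)) B.toList (A.toList.length - 2) with hrdef
        have hge := go_ge (List.drop 1 (A.toList ++ A.toList)) B.toList (A.toList.length - 2)
        rw [← hrdef] at hge
        by_cases hr1 : r = -1
        · rw [if_pos hr1, if_pos hr1]; norm_num
        · rw [if_neg hr1, if_neg hr1, if_neg (by omega)]
    · -- different lengths: A's loop runs out and returns -1, B's length test returns -1
      rw [if_pos (by rw [PySem.Str.len_eq, PySem.Str.len_eq]; omega)]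
      have := loop_len_ne A.toList B.toList (by omega) hL (A.toList.length + 1) (by omega)
        (A.toList.length + 2) (by omega) A.toList rfl
      rw [show ((A.toList.length + 1 - (A.toList.length + 1) : Nat) : Int) = 0 from by norm_num] at this
      exact this

-- ===== VERDICT (by name: the statement is the Claim_ definition above) =====
theorem solution_spec : Claim_equal_solution := by
  intro A B _ hpre
  unfold Spec_solution
  exact main_eq A B hpre
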